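-- pv_equiv track=rewrite | github.com/hypnozer/python-project-50 | gendiff/modules/parse_files.py | make_changelog
-- ===== SOURCE A (Python) =====
-- def make_changelog(original_file, changed_file):
--     changelog = []
--
--     all_keys = sorted(set(original_file.keys()).union(set(changed_file.keys()))
--                       )
--
--     for key in all_keys:
--         if key in original_file and key in changed_file:
--             if original_file[key] == changed_file[key]:
--                 changelog.append({'key': key, 'type': 'unchanged'})
--             else:
--                 changelog.append({'key': key, 'type': 'changed'})
--         elif key in original_file:
--             changelog.append({'key': key, 'type': 'deleted'})
--         elif key in changed_file:
--             changelog.append({'key': key, 'type': 'added'})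
--
--     return changelog
-- ===== SOURCE B (Python) =====
-- def make_changelog(original_file, changed_file):
--     left = sorted(original_file)
--     right = sorted(changed_file)
--     i = j = 0
--     changelog = []
--     while i < len(left) and j < len(right):
--         if left[i] < right[j]:
--             changelog.append({'key': left[i], 'type': 'deleted'})
--             i += 1
--         elif right[j] < left[i]:
--             changelog.append({'key': right[j], 'type': 'added'})
--             j += 1
--         else:
--             key = left[i]
--             if original_file[key] == changed_file[key]:
--                 changelog.append({'key': key, 'type': 'unchanged'})
--             else:
--                 changelog.append({'key': key, 'type': 'changed'})
--             i += 1
--             j += 1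
--     while i < len(left):
--         changelog.append({'key': left[i], 'type': 'deleted'})
--         i += 1
--     while j < len(right):
--         changelog.append({'key': right[j], 'type': 'added'})
--         j += 1
--     return changelog
-- ===== Notes on version B (the rewrite author's own statement) =====
-- stated objective: alternative
-- what changed: B sorts each dict's keys separately and classifies entries with a two-pointer merge of the two sorted key lists (less = deleted, greater = added, equal = compare values), instead of A's sort of the whole key-set union followed by per-key membership tests.
import Mathlib
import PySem

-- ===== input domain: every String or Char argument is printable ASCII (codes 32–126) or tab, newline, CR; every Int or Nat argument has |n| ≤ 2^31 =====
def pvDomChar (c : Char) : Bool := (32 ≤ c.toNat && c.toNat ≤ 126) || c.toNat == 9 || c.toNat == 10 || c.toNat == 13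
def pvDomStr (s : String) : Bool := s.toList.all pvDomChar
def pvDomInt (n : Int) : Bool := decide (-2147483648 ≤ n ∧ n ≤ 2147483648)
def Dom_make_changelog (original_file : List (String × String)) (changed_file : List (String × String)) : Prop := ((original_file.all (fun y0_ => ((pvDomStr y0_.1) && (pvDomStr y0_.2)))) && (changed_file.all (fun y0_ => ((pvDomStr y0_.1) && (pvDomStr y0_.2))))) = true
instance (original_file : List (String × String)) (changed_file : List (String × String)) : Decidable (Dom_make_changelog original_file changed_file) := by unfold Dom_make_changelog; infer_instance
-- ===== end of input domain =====

-- B replaces A's sort-the-key-union-then-branch loop by a two-pointer merge of the two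
-- separately sorted key lists (alternative algorithm, same cost).

-- ===== PORT A =====
def make_changelog (original_file : List (String × String)) (changed_file : List (String × String)) : List (List (String × String)) :=
  let od := PySem.Dict.ofList original_file
  let cd := PySem.Dict.ofList changed_file
  let all_keys := PySem.List.sorted
    (PySem.Set.union (PySem.Set.ofList od.keys) (PySem.Set.ofList cd.keys)) (fun k => k) false
  all_keys.foldl (fun changelog key =>
    if od.contains key && cd.contains key then
      -- original_file[key] / changed_file[key]: the guard guarantees presence, so Python's
      -- d[key] cannot raise here; ported as getD with an unreachable default
      if od.getD key "" == cd.getD key "" then changelog ++ [[("key", key), ("type", "unchanged")]]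
      else changelog ++ [[("key", key), ("type", "changed")]]
    else if od.contains key then changelog ++ [[("key", key), ("type", "deleted")]]
    else if cd.contains key then changelog ++ [[("key", key), ("type", "added")]]
    else changelog) []

-- ===== PORT B =====
-- the two-pointer while loop of Source B: advancing i/j over the two sorted lists ≡ consuming
-- their heads; the two trailing drain loops are the (xs, []) and ([], ys) cases
def mergeLoop (od cd : PySem.Dict String String) : List String → List String → List (List (String × String))
  | x :: xs, y :: ys =>
    if x < y then [("key", x), ("type", "deleted")] :: mergeLoop od cd xs (y :: ys)
    else if y < x then [("key", y), ("type", "added")] :: mergeLoop od cd (x :: xs) ys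
    else  -- original_file[key] / changed_file[key]: key is in both dicts here, cannot raise
      (if od.getD x "" == cd.getD x "" then [("key", x), ("type", "unchanged")]
       else [("key", x), ("type", "changed")]) :: mergeLoop od cd xs ys
  | xs, [] => xs.map (fun x => [("key", x), ("type", "deleted")])
  | [], ys => ys.map (fun y => [("key", y), ("type", "added")])
termination_by l r => l.length + r.length

def make_changelog_alt (original_file : List (String × String)) (changed_file : List (String × String)) : List (List (String × String)) :=
  let od := PySem.Dict.ofList original_file
  let cd := PySem.Dict.ofList changed_file
  let left := PySem.List.sorted od.keys (fun k => k) false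
  let right := PySem.List.sorted cd.keys (fun k => k) false
  mergeLoop od cd left right

-- ===== PRECONDITION & SPEC =====
def Spec_make_changelog (original_file : List (String × String)) (changed_file : List (String × String)) (out : List (List (String × String))) : Prop := out = make_changelog_alt original_file changed_file
instance (original_file : List (String × String)) (changed_file : List (String × String)) (out : List (List (String × String))) : Decidable (Spec_make_changelog original_file changed_file out) := by unfold Spec_make_changelog; infer_instance

-- ===== CLAIM (what is proved, stated in full; the proofs are below) =====
def Claim_equal_make_changelog : Prop := ∀ (original_file : List (String × String)) (changed_file : List (String × String)), Dom_make_changelog original_file changed_file → Spec_make_changelog original_file changed_file (make_changelog original_file changed_file)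

-- ===== LEMMAS AND PROOFS =====

-- the entry type A assigns to a key of the union (proof-only helper)
def atype (od cd : PySem.Dict String String) (k : String) : String :=
  if od.contains k && cd.contains k then
    (if od.getD k "" == cd.getD k "" then "unchanged" else "changed")
  else if od.contains k then "deleted" else "added"

lemma foldA (od cd : PySem.Dict String String) (l : List String)
    (acc : List (List (String × String)))
    (h : ∀ k ∈ l, od.contains k = true ∨ cd.contains k = true) :
    l.foldl (fun changelog key =>
      if od.contains key && cd.contains key then
        if od.getD key "" == cd.getD key "" then changelog ++ [[("key", key), ("type", "unchanged")]]
        else changelog ++ [[("key", key), ("type", "changed")]]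
      else if od.contains key then changelog ++ [[("key", key), ("type", "deleted")]]
      else if cd.contains key then changelog ++ [[("key", key), ("type", "added")]]
      else changelog) acc
    = acc ++ l.map (fun k => [("key", k), ("type", atype od cd k)]) := by
  induction l generalizing acc with
  | nil => simp
  | cons x t ih =>
    have hx := h x (List.mem_cons_self ..)
    rw [List.foldl_cons, ih _ (fun k hk => h k (List.mem_cons_of_mem _ hk)), List.map_cons]
    have hstep : (if od.contains x && cd.contains x then
        if od.getD x "" == cd.getD x "" then acc ++ [[("key", x), ("type", "unchanged")]]
        else acc ++ [[("key", x), ("type", "changed")]]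
      else if od.contains x then acc ++ [[("key", x), ("type", "deleted")]]
      else if cd.contains x then acc ++ [[("key", x), ("type", "added")]]
      else acc) = acc ++ [[("key", x), ("type", atype od cd x)]] := by
      unfold atype
      split_ifs with h1 h2 h3 h4 <;> first | rfl | (rcases hx with hx | hx <;> simp_all)
    rw [hstep, List.append_assoc, List.singleton_append]

-- the key sequence the merge visits (proof-only helper)
def mergeKeys : List String → List String → List String
  | x :: xs, y :: ys =>
    if x < y then x :: mergeKeys xs (y :: ys)
    else if y < x then y :: mergeKeys (x :: xs) ys
    else x :: mergeKeys xs ys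
  | xs, [] => xs
  | [], ys => ys
termination_by l r => l.length + r.length

lemma mem_mergeKeys (a : String) (L R : List String) :
    a ∈ mergeKeys L R ↔ a ∈ L ∨ a ∈ R := by
  induction L, R using mergeKeys.induct with
  | case1 x xs y ys hxy ih =>
    rw [mergeKeys]; simp only [if_pos hxy, List.mem_cons, ih]; tauto
  | case2 x xs y ys hxy hyx ih =>
    rw [mergeKeys]; simp only [if_neg hxy, if_pos hyx, List.mem_cons, ih]; tauto
  | case3 x xs y ys hxy hyx ih =>
    have hxy' : x = y := le_antisymm (le_of_not_gt hyx) (le_of_not_gt hxy)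
    subst hxy'
    rw [mergeKeys]; simp only [if_neg hxy, List.mem_cons, ih]; tauto
  | case4 xs => rw [mergeKeys]; simp
  | case5 y hy =>
    rw [mergeKeys]
    · simp
    · exact hy

lemma pairwise_mergeKeys (L R : List String)
    (hL : L.Pairwise (· < ·)) (hR : R.Pairwise (· < ·)) :
    (mergeKeys L R).Pairwise (· < ·) := by
  induction L, R using mergeKeys.induct with
  | case1 x xs y ys hxy ih =>
    rw [mergeKeys, if_pos hxy]
    refine List.pairwise_cons.mpr ⟨?_, ih (List.pairwise_cons.mp hL).2 hR⟩
    intro b hb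
    rcases (mem_mergeKeys b xs (y :: ys)).mp hb with hb | hb
    · exact (List.pairwise_cons.mp hL).1 b hb
    · rcases List.mem_cons.mp hb with rfl | hb
      · exact hxy
      · exact lt_trans hxy ((List.pairwise_cons.mp hR).1 b hb)
  | case2 x xs y ys hxy hyx ih =>
    rw [mergeKeys, if_neg hxy, if_pos hyx]
    refine List.pairwise_cons.mpr ⟨?_, ih hL (List.pairwise_cons.mp hR).2⟩
    intro b hb
    rcases (mem_mergeKeys b (x :: xs) ys).mp hb with hb | hb
    · rcases List.mem_cons.mp hb with rfl | hb
      · exact hyx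
      · exact lt_trans hyx ((List.pairwise_cons.mp hL).1 b hb)
    · exact (List.pairwise_cons.mp hR).1 b hb
  | case3 x xs y ys hxy hyx ih =>
    have hxy' : x = y := le_antisymm (le_of_not_gt hyx) (le_of_not_gt hxy)
    subst hxy'
    rw [mergeKeys, if_neg hxy, if_neg hyx]
    refine List.pairwise_cons.mpr ⟨?_, ih (List.pairwise_cons.mp hL).2 (List.pairwise_cons.mp hR).2⟩
    intro b hb
    rcases (mem_mergeKeys b xs ys).mp hb with hb | hb
    · exact (List.pairwise_cons.mp hL).1 b hb
    · exact (List.pairwise_cons.mp hR).1 b hb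
  | case4 xs => rw [mergeKeys]; exact hL
  | case5 y hy =>
    rw [mergeKeys]
    · exact hR
    · exact hy

lemma mergeLoop_eq (od cd : PySem.Dict String String) (L R : List String)
    (hL : L.Pairwise (· < ·)) (hR : R.Pairwise (· < ·))
    (h1 : ∀ a ∈ L, od.contains a = true)
    (h2 : ∀ b ∈ R, cd.contains b = true)
    (h3 : ∀ a ∈ L, (cd.contains a = true ↔ a ∈ R))
    (h4 : ∀ b ∈ R, (od.contains b = true ↔ b ∈ L)) :
    mergeLoop od cd L R
      = (mergeKeys L R).map (fun k => [("key", k), ("type", atype od cd k)]) := by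
  induction L, R using mergeKeys.induct with
  | case1 x xs y ys hxy ih =>
    have hox : od.contains x = true := h1 x (List.mem_cons_self ..)
    have hmem : x ∉ y :: ys := by
      intro h
      rcases List.mem_cons.mp h with rfl | h
      · exact lt_irrefl x hxy
      · exact lt_asymm hxy ((List.pairwise_cons.mp hR).1 x h)
    have hcx : cd.contains x = false := by
      rw [← Bool.not_eq_true]
      exact fun hc => hmem ((h3 x (List.mem_cons_self ..)).mp hc)
    simp only [mergeLoop, mergeKeys, if_pos hxy, List.map_cons]
    have hhead : [("key", x), ("type", atype od cd x)] = [("key", x), ("type", "deleted")] := by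
      simp [atype, hox, hcx]
    rw [hhead]
    refine congrArg (List.cons _) ?_
    exact ih (List.pairwise_cons.mp hL).2 hR
        (fun a ha => h1 a (List.mem_cons_of_mem _ ha)) h2
        (fun a ha => h3 a (List.mem_cons_of_mem _ ha))
        (fun b hb => by
          have hbx : b ≠ x := by
            rcases List.mem_cons.mp hb with rfl | hb'
            · exact (ne_of_gt hxy)
            · exact ne_of_gt (lt_trans hxy ((List.pairwise_cons.mp hR).1 b hb'))
          rw [h4 b hb, List.mem_cons]
          simp [hbx])
  | case2 x xs y ys hxy hyx ih =>
    have hcy : cd.contains y = true := h2 y (List.mem_cons_self ..)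
    have hmem : y ∉ x :: xs := by
      intro h
      rcases List.mem_cons.mp h with rfl | h
      · exact lt_irrefl y hyx
      · exact lt_asymm hyx ((List.pairwise_cons.mp hL).1 y h)
    have hoy : od.contains y = false := by
      rw [← Bool.not_eq_true]
      exact fun hc => hmem ((h4 y (List.mem_cons_self ..)).mp hc)
    simp only [mergeLoop, mergeKeys, if_neg hxy, if_pos hyx, List.map_cons]
    have hhead : [("key", y), ("type", atype od cd y)] = [("key", y), ("type", "added")] := by
      simp [atype, hoy, hcy]
    rw [hhead]
    refine congrArg (List.cons _) ?_
    exact ih hL (List.pairwise_cons.mp hR).2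
        h1 (fun b hb => h2 b (List.mem_cons_of_mem _ hb))
        (fun a ha => by
          have hay : a ≠ y := by
            rcases List.mem_cons.mp ha with rfl | ha'
            · exact (ne_of_gt hyx)
            · exact ne_of_gt (lt_trans hyx ((List.pairwise_cons.mp hL).1 a ha'))
          rw [h3 a ha, List.mem_cons]
          simp [hay])
        (fun b hb => h4 b (List.mem_cons_of_mem _ hb))
  | case3 x xs y ys hxy hyx ih =>
    have hxy' : x = y := le_antisymm (le_of_not_gt hyx) (le_of_not_gt hxy)
    subst hxy'
    have hox : od.contains x = true := h1 x (List.mem_cons_self ..)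
    have hcx : cd.contains x = true := h2 x (List.mem_cons_self ..)
    simp only [mergeLoop, mergeKeys, if_neg hxy, List.map_cons]
    have hhead : [("key", x), ("type", atype od cd x)]
        = (if od.getD x "" == cd.getD x "" then [("key", x), ("type", "unchanged")]
           else [("key", x), ("type", "changed")]) := by
      unfold atype
      rw [hox, hcx]
      split_ifs <;> simp_all
    rw [hhead]
    refine congrArg (List.cons _) ?_
    exact ih (List.pairwise_cons.mp hL).2 (List.pairwise_cons.mp hR).2
        (fun a ha => h1 a (List.mem_cons_of_mem _ ha))
        (fun b hb => h2 b (List.mem_cons_of_mem _ hb))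
        (fun a ha => by
          have hax : a ≠ x := ne_of_gt ((List.pairwise_cons.mp hL).1 a ha)
          rw [h3 a (List.mem_cons_of_mem _ ha), List.mem_cons]
          simp [hax])
        (fun b hb => by
          have hbx : b ≠ x := ne_of_gt ((List.pairwise_cons.mp hR).1 b hb)
          rw [h4 b (List.mem_cons_of_mem _ hb), List.mem_cons]
          simp [hbx])
  | case4 xs =>
    simp only [mergeLoop, mergeKeys]
    refine List.map_congr_left (fun x hx => ?_)
    have hox : od.contains x = true := h1 x hx
    have hcx : cd.contains x = false := by
      rw [← Bool.not_eq_true]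
      exact fun hc => by simpa using (h3 x hx).mp hc
    simp [atype, hox, hcx]
  | case5 ysl hy =>
    rw [mergeLoop, mergeKeys]
    · refine List.map_congr_left (fun x hx => ?_)
      have hcx : cd.contains x = true := h2 x hx
      have hox : od.contains x = false := by
        rw [← Bool.not_eq_true]
        exact fun hc => by simpa using (h4 x hx).mp hc
      simp [atype, hox, hcx]
    all_goals exact hy

lemma make_changelog_core (od cd : PySem.Dict String String)
    (hok : od.keys.Nodup) (hck : cd.keys.Nodup) :
    (PySem.List.sorted
      (PySem.Set.union (PySem.Set.ofList od.keys) (PySem.Set.ofList cd.keys)) (fun k => k) false).foldl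
      (fun changelog key =>
        if od.contains key && cd.contains key then
          if od.getD key "" == cd.getD key "" then changelog ++ [[("key", key), ("type", "unchanged")]]
          else changelog ++ [[("key", key), ("type", "changed")]]
        else if od.contains key then changelog ++ [[("key", key), ("type", "deleted")]]
        else if cd.contains key then changelog ++ [[("key", key), ("type", "added")]]
        else changelog) []
    = mergeLoop od cd (PySem.List.sorted od.keys (fun k => k) false)
        (PySem.List.sorted cd.keys (fun k => k) false) := by
  set L : List String := PySem.List.sorted od.keys (fun k => k) false with hLdef
  set R : List String := PySem.List.sorted cd.keys (fun k => k) false with hRdef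
  set U : List String :=
    PySem.Set.union (PySem.Set.ofList od.keys) (PySem.Set.ofList cd.keys) with hUdef
  have hndU : U.Nodup := PySem.Set.nodup_union _ _ (PySem.Set.nodup_ofList _)
  have hmemU : ∀ x, x ∈ U ↔ x ∈ od.keys ∨ x ∈ cd.keys := by
    intro x
    rw [hUdef, PySem.Set.mem_union, PySem.Set.mem_ofList, PySem.Set.mem_ofList]
  have hmemL : ∀ x, x ∈ L ↔ x ∈ od.keys := fun x => PySem.List.mem_sorted ..
  have hmemR : ∀ x, x ∈ R ↔ x ∈ cd.keys := fun x => PySem.List.mem_sorted ..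
  have hLp : L.Pairwise (· < ·) := by
    have hnd : L.Nodup := ((PySem.List.sorted_perm od.keys (fun k => k) false).nodup_iff).mpr hok
    exact ((PySem.List.sorted_pairwise od.keys (fun k => k)).and hnd).imp
      fun h => lt_of_le_of_ne h.1 h.2
  have hRp : R.Pairwise (· < ·) := by
    have hnd : R.Nodup := ((PySem.List.sorted_perm cd.keys (fun k => k) false).nodup_iff).mpr hck
    exact ((PySem.List.sorted_pairwise cd.keys (fun k => k)).and hnd).imp
      fun h => lt_of_le_of_ne h.1 h.2
  -- A's loop is a map over the sorted union
  have hA := foldA od cd (PySem.List.sorted U (fun k => k) false) []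
    (fun k hk => by
      rcases (hmemU k).mp ((PySem.List.mem_sorted _ _ _ _).mp hk) with hk' | hk'
      · exact Or.inl ((PySem.Dict.contains_iff_mem_keys od k).mpr hk')
      · exact Or.inr ((PySem.Dict.contains_iff_mem_keys cd k).mpr hk'))
  rw [List.nil_append] at hA
  -- B's merge is the same map over mergeKeys L R
  have hB := mergeLoop_eq od cd L R hLp hRp
    (fun a ha => (PySem.Dict.contains_iff_mem_keys od a).mpr ((hmemL a).mp ha))
    (fun b hb => (PySem.Dict.contains_iff_mem_keys cd b).mpr ((hmemR b).mp hb))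
    (fun a _ => by rw [PySem.Dict.contains_iff_mem_keys, ← hmemR])
    (fun b _ => by rw [PySem.Dict.contains_iff_mem_keys, ← hmemL])
  -- and mergeKeys L R is exactly the sorted union
  have hndMK : (mergeKeys L R).Nodup :=
    (pairwise_mergeKeys L R hLp hRp).imp ne_of_lt
  have hperm : (mergeKeys L R).Perm U := by
    rw [List.perm_ext_iff_of_nodup hndMK hndU]
    intro x
    rw [mem_mergeKeys, hmemU, hmemL, hmemR]
  have hsort : PySem.List.sorted U (fun k => k) false = mergeKeys L R :=
    PySem.List.sorted_eq_of_perm_of_pairwise_lt _ _ _ hperm (pairwise_mergeKeys L R hLp hRp)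
  rw [hA, hB, hsort]

-- ===== VERDICT (by name: the statement is the Claim_ definition above) =====
theorem make_changelog_spec : Claim_equal_make_changelog := by
  intro original_file changed_file _
  show make_changelog original_file changed_file = make_changelog_alt original_file changed_file
  exact make_changelog_core (PySem.Dict.ofList original_file) (PySem.Dict.ofList changed_file)
    (PySem.Dict.nodup_keys_ofList _) (PySem.Dict.nodup_keys_ofList _)
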